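-- pv_equiv track=rewrite | github.com/jawadafkar/mooc-programming-24 | part04-30_shortest_in_list/src/shortest_in_list.py | shortest
-- ===== SOURCE A (Python) =====
-- def shortest(list):
--     shortest = list[0]
--     length = len(list[0])
--     for item in list:
--         if length > len(item):
--             shortest = item
--             length = len(item)
--     return shortest
-- ===== SOURCE B (Python) =====
-- def shortest(list):
--     return sorted(list, key=len)[0]
-- ===== Notes on version B (the rewrite author's own statement) =====
-- stated objective: simpler
-- what changed: Replaces the manual strict-greater scan with a stable length-keyed sort and taking the first element (ties keep original order, matching A's first-shortest choice).
import Mathlib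
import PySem

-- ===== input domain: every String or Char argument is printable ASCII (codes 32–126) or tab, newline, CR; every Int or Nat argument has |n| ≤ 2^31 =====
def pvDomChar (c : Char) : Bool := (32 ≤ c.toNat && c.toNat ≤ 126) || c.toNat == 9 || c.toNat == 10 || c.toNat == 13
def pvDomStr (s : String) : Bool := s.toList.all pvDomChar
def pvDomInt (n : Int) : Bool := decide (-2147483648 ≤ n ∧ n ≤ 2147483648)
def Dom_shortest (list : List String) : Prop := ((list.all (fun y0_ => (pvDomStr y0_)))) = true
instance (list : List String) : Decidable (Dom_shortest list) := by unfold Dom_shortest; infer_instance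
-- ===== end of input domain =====

-- B replaces A's manual strict-greater scan by a stable sort on length and taking the
-- first element; equivalence of the return value is proved on nonempty lists.

-- ===== PORT A =====
def shortest (list : List String) : String :=
  match PySem.List.pyGet? list 0 with
  | none => ""          -- list[0] raises IndexError on the empty list; excluded by Pre_
  | some s0 =>
    (list.foldl
      (fun (st : String × Int) item =>
        if st.2 > PySem.Str.len item then (item, PySem.Str.len item) else st)
      (s0, PySem.Str.len s0)).1

-- ===== PORT B =====
def shortest_alt (list : List String) : String :=
  match PySem.List.pyGet? (PySem.List.sorted list (fun s => PySem.Str.len s) false) 0 with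
  | none => ""          -- sorted(list, key=len)[0] raises IndexError on the empty list
  | some s => s

-- ===== PRECONDITION & SPEC =====
-- Pre_ excludes only the empty list, on which both Pythons raise IndexError.
def Pre_shortest (list : List String) : Prop := list ≠ []
instance (list : List String) : Decidable (Pre_shortest list) := by unfold Pre_shortest; infer_instance
def pvWitness_shortest : List String := (["ab", "c"])
def Spec_shortest (list : List String) (out : String) : Prop := out = shortest_alt list
instance (list : List String) (out : String) : Decidable (Spec_shortest list out) := by unfold Spec_shortest; infer_instance

-- ===== CLAIM (what is proved, stated in full; the proofs are below) =====
def Claim_equal_shortest : Prop := ∀ (list : List String), Dom_shortest list → Pre_shortest list → Spec_shortest list (shortest list)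

-- ===== LEMMAS AND PROOFS =====

-- A's loop body and B's insertion, abbreviated for the proofs.
def pvStepA (st : String × Int) (item : String) : String × Int :=
  if st.2 > PySem.Str.len item then (item, PySem.Str.len item) else st

def pvIns (acc : List String) (x : String) : List String :=
  PySem.List.insertBy (fun a b => decide (PySem.Str.len a < PySem.Str.len b)) x acc

-- head of a stable length-insertion: the new element wins iff strictly shorter.
lemma head_pvIns (x y : String) (ys : List String) :
    (pvIns (y :: ys) x).head? =
      some (if PySem.Str.len y > PySem.Str.len x then x else y) := by
  simp only [pvIns, PySem.List.insertBy, gt_iff_lt]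
  by_cases h : PySem.Str.len x < PySem.Str.len y
  · simp only [h, decide_true, List.head?_cons, ite_true]
  · simp only [h, decide_false, List.head?_cons, ite_false, Bool.false_eq_true]

-- invariant: the head of the insertion-sort accumulator tracks A's fold state.
lemma fold_head (xs : List String) : ∀ (m : String) (ys : List String),
    (xs.foldl pvIns (m :: ys)).head? =
      some ((xs.foldl pvStepA (m, PySem.Str.len m)).1) := by
  induction xs with
  | nil => intro m ys; rfl
  | cons x xs ih =>
    intro m ys
    simp only [List.foldl_cons]
    by_cases hc : PySem.Str.len m > PySem.Str.len x
    · have hh : (pvIns (m :: ys) x).head? = some x := by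
        rw [head_pvIns, if_pos hc]
      obtain ⟨zs, hz⟩ : ∃ zs, pvIns (m :: ys) x = x :: zs := by
        cases hi : pvIns (m :: ys) x with
        | nil => rw [hi] at hh; exact absurd hh (by simp)
        | cons a as =>
          rw [hi] at hh
          simp only [List.head?_cons, Option.some.injEq] at hh
          exact ⟨as, by rw [hh]⟩
      rw [hz, show pvStepA (m, PySem.Str.len m) x = (x, PySem.Str.len x) by
        simp only [pvStepA]; rw [if_pos hc]]
      exact ih x zs
    · have hh : (pvIns (m :: ys) x).head? = some m := by
        rw [head_pvIns, if_neg hc]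
      obtain ⟨zs, hz⟩ : ∃ zs, pvIns (m :: ys) x = m :: zs := by
        cases hi : pvIns (m :: ys) x with
        | nil => rw [hi] at hh; exact absurd hh (by simp)
        | cons a as =>
          rw [hi] at hh
          simp only [List.head?_cons, Option.some.injEq] at hh
          exact ⟨as, by rw [hh]⟩
      rw [hz, show pvStepA (m, PySem.Str.len m) x = (m, PySem.Str.len m) by
        simp only [pvStepA]; rw [if_neg hc]]
      exact ih m zs

-- ===== VERDICT (by name: the statement is the Claim_ definition above) =====
theorem shortest_spec : Claim_equal_shortest := by
  intro list _ hpre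
  obtain ⟨h, t, rfl⟩ : ∃ h t, list = h :: t := by
    cases list with
    | nil => exact absurd rfl hpre
    | cons a as => exact ⟨a, as, rfl⟩
  unfold Spec_shortest shortest shortest_alt
  have hsorted : PySem.List.sorted (h :: t) (fun s => PySem.Str.len s) false
      = (h :: t).foldl pvIns [] := by
    rw [PySem.List.sorted_eq_foldl_insertBy]; rfl
  have hA : ((h :: t).foldl pvStepA (h, PySem.Str.len h)).1
      = (t.foldl pvStepA (h, PySem.Str.len h)).1 := by
    simp [List.foldl_cons, pvStepA]
  have hfirst : (h :: t).foldl pvIns [] = t.foldl pvIns [h] := by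
    simp [List.foldl_cons, pvIns, PySem.List.insertBy]
  have hhead : ((h :: t).foldl pvIns []).head? =
      some (((h :: t).foldl pvStepA (h, PySem.Str.len h)).1) := by
    rw [hfirst, hA]
    exact fold_head t h []
  rw [PySem.List.pyGet?_zero_cons, hsorted]
  cases hs : (h :: t).foldl pvIns [] with
  | nil => rw [hs] at hhead; exact absurd hhead (by simp)
  | cons a as =>
    rw [hs] at hhead
    simp only [List.head?_cons, Option.some.injEq] at hhead
    simp only [PySem.List.pyGet?_zero_cons]
    simpa [pvStepA, gt_iff_lt] using hhead.symm
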